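-- pv_equiv track=rewrite | github.com/GonzaloMardones/Aircraft-Boarding-Strategy | aircraft_boarding_strategy.py | simulate_boarding
-- ===== SOURCE A (Python) =====
-- def simulate_boarding(boarding_groups):
--     seated_passengers = set()
--     blocking_events = 0
--
--     for group in boarding_groups:
--         for row, seat in group:
--             if seat == "M":
--                 if (row, "A") not in seated_passengers:
--                     blocking_events += 1
--             seated_passengers.add((row, seat))
--
--     return blocking_events
-- ===== SOURCE B (Python) =====
-- def simulate_boarding(boarding_groups):
--     flat = [p for g in boarding_groups for p in g]
--     first_a = {}
--     for i, (row, seat) in enumerate(flat):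
--         if seat == "A" and row not in first_a:
--             first_a[row] = i
--     blocking_events = 0
--     for i, (row, seat) in enumerate(flat):
--         if seat == "M" and first_a.get(row, len(flat)) >= i:
--             blocking_events += 1
--     return blocking_events
-- ===== Notes on version B (the rewrite author's own statement) =====
-- stated objective: alternative
-- what changed: Replaces the interleaved seat-and-check simulation over a growing set of seated passengers by two independent passes over the flattened list: one builds a first-occurrence index table for each row's aisle seat, the other counts middle-seat passengers whose row's first aisle index is not strictly earlier.
import Mathlib
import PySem

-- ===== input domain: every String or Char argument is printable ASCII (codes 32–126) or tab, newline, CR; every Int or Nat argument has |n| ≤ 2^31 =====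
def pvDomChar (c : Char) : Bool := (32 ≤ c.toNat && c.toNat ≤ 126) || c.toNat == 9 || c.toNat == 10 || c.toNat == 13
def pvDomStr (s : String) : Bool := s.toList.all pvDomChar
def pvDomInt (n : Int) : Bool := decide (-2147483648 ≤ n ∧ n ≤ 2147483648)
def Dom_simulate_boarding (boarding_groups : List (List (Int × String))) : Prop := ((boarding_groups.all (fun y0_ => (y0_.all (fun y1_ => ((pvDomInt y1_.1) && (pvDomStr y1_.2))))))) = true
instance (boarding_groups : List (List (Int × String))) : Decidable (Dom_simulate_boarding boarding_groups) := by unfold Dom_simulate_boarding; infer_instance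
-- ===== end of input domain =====

-- B replaces A's interleaved seat-and-check set simulation by two independent
-- passes: a first-occurrence index table for each row's aisle seat, then a
-- counting pass comparing indices (objective: alternative decomposition).

-- ===== PORT A =====
-- inner 'for row, seat in group' loop of A, threading (seated_passengers, blocking_events)
def pvBoardGroup : List (Int × String) → PySem.Set (Int × String) → Int → PySem.Set (Int × String) × Int
  | [], s, c => (s, c)
  | (row, seat) :: t, s, c =>
      pvBoardGroup t (PySem.Set.add s (row, seat))
        (if seat = "M" ∧ (row, "A") ∉ s then c + 1 else c)

-- outer 'for group in boarding_groups' loop of A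
def pvBoardLoop : List (List (Int × String)) → PySem.Set (Int × String) → Int → Int
  | [], _, c => c
  | g :: gs, s, c => pvBoardLoop gs (pvBoardGroup g s c).1 (pvBoardGroup g s c).2

def simulate_boarding (boarding_groups : List (List (Int × String))) : Int :=
  pvBoardLoop boarding_groups PySem.Set.empty 0

-- ===== PORT B =====
-- first pass of B: first_a[row] = first index i with flat[i] = (row, "A")
def pvBuildFirstA : List (Int × String) → Nat → PySem.Dict Int Nat → PySem.Dict Int Nat
  | [], _, d => d
  | (row, seat) :: t, i, d =>
      pvBuildFirstA t (i + 1) (if seat = "A" ∧ d.contains row = false then d.insert row i else d)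

-- second pass of B: count M-seats whose row's first aisle index is not before them
def pvCountBlocking (d : PySem.Dict Int Nat) (n : Nat) : List (Int × String) → Nat → Int → Int
  | [], _, c => c
  | (row, seat) :: t, i, c =>
      pvCountBlocking d n t (i + 1) (if seat = "M" ∧ i ≤ d.getD row n then c + 1 else c)

def simulate_boarding_alt (boarding_groups : List (List (Int × String))) : Int :=
  let flat := boarding_groups.flatMap (fun g => g)
  let d := pvBuildFirstA flat 0 PySem.Dict.empty
  pvCountBlocking d flat.length flat 0 0

-- ===== PRECONDITION & SPEC =====
def Spec_simulate_boarding (boarding_groups : List (List (Int × String))) (out : Int) : Prop := out = simulate_boarding_alt boarding_groups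
instance (boarding_groups : List (List (Int × String))) (out : Int) : Decidable (Spec_simulate_boarding boarding_groups out) := by unfold Spec_simulate_boarding; infer_instance

-- ===== CLAIM (what is proved, stated in full; the proofs are below) =====
def Claim_equal_simulate_boarding : Prop := ∀ (boarding_groups : List (List (Int × String))), Dom_simulate_boarding boarding_groups → Spec_simulate_boarding boarding_groups (simulate_boarding boarding_groups)

-- ===== LEMMAS AND PROOFS =====

-- index of the first occurrence of (r, "A") in a list
def pvFirstIdx (r : Int) : List (Int × String) → Option Nat
  | [] => none
  | (row, seat) :: t => if row = r ∧ seat = "A" then some 0 else (pvFirstIdx r t).map (· + 1)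

theorem pvBuildFirstA_get? (l : List (Int × String)) :
    ∀ (k : Nat) (acc : PySem.Dict Int Nat) (r : Int),
      (pvBuildFirstA l k acc).get? r =
        match acc.get? r with
        | some m => some m
        | none => (pvFirstIdx r l).map (· + k) := by
  induction l with
  | nil => intro k acc r; cases h : acc.get? r <;> simp [pvBuildFirstA, pvFirstIdx, h]
  | cons p t ih =>
    obtain ⟨row, seat⟩ := p
    intro k acc r
    by_cases hc : seat = "A" ∧ acc.contains row = false
    · simp only [pvBuildFirstA, if_pos hc]
      rw [ih]
      by_cases hr : r = row
      · subst hr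
        have hnone : acc.get? r = none := (PySem.Dict.get?_eq_none_iff_contains acc r).2 hc.2
        rw [PySem.Dict.get?_insert_self]
        simp [pvFirstIdx, hc.1, hnone]
      · rw [PySem.Dict.get?_insert_of_ne _ _ hr]
        cases h : acc.get? r with
        | some m => simp
        | none =>
          have hhead : ¬ (row = r ∧ seat = "A") := fun hh => hr hh.1.symm
          simp only [pvFirstIdx, if_neg hhead]
          cases hf : pvFirstIdx r t <;> simp [hf] <;> omega
    · simp only [pvBuildFirstA, if_neg hc]
      rw [ih]
      cases h : acc.get? r with
      | some m => simp
      | none =>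
        by_cases hhead : row = r ∧ seat = "A"
        · exfalso
          have : acc.contains row ≠ false := fun hcf => hc ⟨hhead.2, hcf⟩
          have : acc.contains row = true := by
            cases hb : acc.contains row
            · exact absurd hb this
            · rfl
          have hnone : acc.get? row = none := by rw [hhead.1]; exact h
          rw [(PySem.Dict.get?_eq_none_iff_contains acc row).1 hnone] at this
          exact Bool.false_ne_true this
        · simp only [pvFirstIdx, if_neg hhead]
          cases hf : pvFirstIdx r t <;> simp [hf] <;> omega

theorem pvMem_iff_firstIdx (r : Int) (pre : List (Int × String)) :
    ∀ (l : List (Int × String)),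
      ((r, "A") ∈ pre) ↔ ∃ m, pvFirstIdx r (pre ++ l) = some m ∧ m < pre.length := by
  induction pre with
  | nil => intro l; simp
  | cons p t ih =>
    obtain ⟨row, seat⟩ := p
    intro l
    by_cases hh : row = r ∧ seat = "A"
    · obtain ⟨h1, h2⟩ := hh
      subst h1; subst h2
      simp [pvFirstIdx]
    · have hne : (r, ("A" : String)) ≠ (row, seat) := by
        intro he
        exact hh ⟨congrArg Prod.fst he.symm, congrArg Prod.snd he.symm⟩
      constructor
      · intro hmem
        rcases List.mem_cons.1 hmem with h | h
        · exact absurd h hne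
        · obtain ⟨m, hm, hml⟩ := (ih l).1 h
          refine ⟨m + 1, ?_, by simpa using Nat.succ_lt_succ hml⟩
          simp [pvFirstIdx, hh, hm]
      · rintro ⟨m, hm, hml⟩
        simp only [List.cons_append, pvFirstIdx, if_neg hh] at hm
        cases hf : pvFirstIdx r (t ++ l) with
        | none => simp [hf] at hm
        | some m' =>
          simp [hf] at hm
          refine List.mem_cons.2 (Or.inr ((ih l).2 ⟨m', hf, ?_⟩))
          simp at hml; omega

theorem pvMain (flat : List (Int × String)) (d : PySem.Dict Int Nat) (n : Nat)
    (hd : d = pvBuildFirstA flat 0 PySem.Dict.empty) (hn : n = flat.length) :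
    ∀ (l pre : List (Int × String)) (s : PySem.Set (Int × String)) (c : Int),
      flat = pre ++ l →
      (∀ r : Int, ((r, "A") ∈ s) ↔ ((r, "A") ∈ pre)) →
      (pvBoardGroup l s c).2 = pvCountBlocking d n l pre.length c := by
  intro l
  induction l with
  | nil => intro pre s c _ _; simp [pvBoardGroup, pvCountBlocking]
  | cons p t ih =>
    obtain ⟨row, seat⟩ := p
    intro pre s c hflat hmem
    have hget : d.get? row = (pvFirstIdx row flat).map (· + 0) := by
      rw [hd, pvBuildFirstA_get?]
      simp [PySem.Dict.get?_empty]
    have hcond : ((row, ("A" : String)) ∉ s) ↔ (pre.length ≤ d.getD row n) := by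
      rw [hmem row, pvMem_iff_firstIdx row pre ((row, seat) :: t), ← hflat]
      cases hf : pvFirstIdx row flat with
      | none =>
        have hgn : d.get? row = none := by rw [hget, hf]; rfl
        have : d.getD row n = n := by simp [PySem.Dict.getD, hgn]
        rw [this]
        have : pre.length ≤ n := by
          rw [hn, hflat]; simp
        simp [hf, this]
      | some m =>
        have hgs : d.get? row = some m := by rw [hget, hf]; simp
        have : d.getD row n = m := by simp [PySem.Dict.getD, hgs]
        rw [this]
        constructor
        · intro hnex
          by_contra hlt
          exact hnex ⟨m, rfl, by omega⟩
        · rintro hle ⟨m', hm', hml⟩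
          have hmm : m = m' := by injection hm'
          omega
    have hmem' : ∀ r : Int, ((r, "A") ∈ PySem.Set.add s (row, seat)) ↔ ((r, "A") ∈ pre ++ [(row, seat)]) := by
      intro r
      rw [PySem.Set.mem_add, List.mem_append, hmem r]
      simp
    have hlen : (pre ++ [(row, seat)]).length = pre.length + 1 := by simp
    have hstep := ih (pre ++ [(row, seat)]) (PySem.Set.add s (row, seat))
      (if seat = "M" ∧ (row, "A") ∉ s then c + 1 else c)
      (by rw [hflat]; simp) hmem'
    rw [hlen] at hstep
    simp only [pvBoardGroup, pvCountBlocking]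
    rw [hstep]
    congr 1
    by_cases hs : seat = "M"
    · by_cases hin : (row, ("A" : String)) ∉ s
      · rw [if_pos ⟨hs, hin⟩, if_pos ⟨hs, hcond.1 hin⟩]
      · rw [if_neg (fun h => hin h.2), if_neg (fun h => hin (hcond.2 h.2))]
    · rw [if_neg (fun h => hs h.1), if_neg (fun h => hs h.1)]

theorem pvBoardGroup_append (a b : List (Int × String)) :
    ∀ (s : PySem.Set (Int × String)) (c : Int),
      pvBoardGroup (a ++ b) s c = pvBoardGroup b (pvBoardGroup a s c).1 (pvBoardGroup a s c).2 := by
  induction a with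
  | nil => intro s c; simp [pvBoardGroup]
  | cons p t ih =>
    obtain ⟨row, seat⟩ := p
    intro s c
    simp only [List.cons_append, pvBoardGroup]
    exact ih _ _

theorem pvBoardLoop_flat (gs : List (List (Int × String))) :
    ∀ (s : PySem.Set (Int × String)) (c : Int),
      pvBoardLoop gs s c = (pvBoardGroup (gs.flatMap (fun g => g)) s c).2 := by
  induction gs with
  | nil => intro s c; simp [pvBoardLoop, pvBoardGroup]
  | cons g t ih =>
    intro s c
    simp only [pvBoardLoop, List.flatMap_cons]
    rw [ih, pvBoardGroup_append]

-- ===== VERDICT (by name: the statement is the Claim_ definition above) =====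
theorem simulate_boarding_spec : Claim_equal_simulate_boarding := by
  intro bg _
  unfold Spec_simulate_boarding simulate_boarding simulate_boarding_alt
  rw [pvBoardLoop_flat]
  exact pvMain (bg.flatMap (fun g => g)) _ _ rfl rfl (bg.flatMap (fun g => g)) [] PySem.Set.empty 0
    (by simp) (fun r => by simp [PySem.Set.empty])
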